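-- pv_equiv track=rewrite | github.com/mwang633/GitHub | puzzles/Turkey.py | solve
-- ===== SOURCE A (Python) =====
-- N = 5
--
-- S = 7
--
-- def solve(actions, pos):
--     if len(pos) == 0:
--         return actions
--     elif len(actions) >= S:
--         return None
--     else:
--         new_pos = {x for x in ([p + 1 for p in pos] + [p - 1 for p in pos]) if 0 <= x < N}
--
--         for i in range(0, N):
--             actions.append(i)
--             ret = solve(actions, {x for x in new_pos if x != i})
--             if ret is not None:
--                 return ret
--             actions.pop()
-- ===== SOURCE B (Python) =====
-- N = 5
--
-- S = 7
--
-- def solve(actions, pos):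
--     # Iterative DFS with an explicit stack of (position-set, path) frames
--     # instead of A's recursion; same return value (and same net in-place
--     # extension of `actions` on success).
--     base = len(actions)
--     stack = [(pos, [])]
--     while stack:
--         cur, path = stack.pop()
--         if len(cur) == 0:
--             actions.extend(path)
--             return actions
--         if base + len(path) >= S:
--             continue
--         new_pos = {x for x in ([p + 1 for p in cur] + [p - 1 for p in cur]) if 0 <= x < N}
--         for i in range(N - 1, -1, -1):
--             stack.append(({x for x in new_pos if x != i}, path + [i]))
--     return None
-- ===== Notes on version B (the rewrite author's own statement) =====
-- stated objective: alternative
-- what changed: Replaces A's recursive backtracking DFS (appending/popping on the shared actions list) by an iterative DFS over an explicit stack of (position-set, path) frames, children pushed in reverse so i=0 is explored first; the path is appended to actions only once on success.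
import Mathlib
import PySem

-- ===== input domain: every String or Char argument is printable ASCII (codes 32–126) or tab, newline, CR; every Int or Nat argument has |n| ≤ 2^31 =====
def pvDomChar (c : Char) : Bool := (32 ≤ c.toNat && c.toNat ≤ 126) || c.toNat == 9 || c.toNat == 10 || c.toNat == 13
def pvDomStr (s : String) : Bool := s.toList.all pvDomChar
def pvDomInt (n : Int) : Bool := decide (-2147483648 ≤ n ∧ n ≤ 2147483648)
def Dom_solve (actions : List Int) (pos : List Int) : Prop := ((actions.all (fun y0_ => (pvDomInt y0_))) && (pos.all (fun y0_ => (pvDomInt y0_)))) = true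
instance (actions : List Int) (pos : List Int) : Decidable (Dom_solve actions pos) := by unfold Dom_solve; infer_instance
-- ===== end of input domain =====

-- B replaces A's recursive backtracking DFS by an iterative DFS over an explicit
-- stack of (position-set, path) frames (children pushed in reverse order); same cost.
-- A mutates `actions` in place (append/pop; net: extended by the found path on
-- success, restored on failure); B performs the same net mutation; the ports and
-- the proof are about the RETURN value.

-- ===== PORT A =====
-- new_pos = {x for x in ([p + 1 for p in pos] + [p - 1 for p in pos]) if 0 <= x < N}
def pvNewPos (cur : List Int) : List Int :=
  PySem.Set.ofList (((cur.map (fun p => p + 1)) ++ (cur.map (fun p => p - 1))).filter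
    (fun x => decide (0 ≤ x) && decide (x < 5)))

-- A's recursion; the Nat argument is a termination fuel equal to S - len(actions)
-- (it never runs out: the `7 ≤ actions.length` guard fires first).
mutual
def solveA : Nat → List Int → List Int → Option (List Int)
  | b, actions, pos =>
    if pos.length = 0 then some actions
    else if 7 ≤ actions.length then none
    else match b with
      | 0 => none   -- unreachable under the fuel invariant
      | b' + 1 => loopA b' actions (pvNewPos pos) (PySem.List.pyRange 0 5 1)
termination_by b actions pos => (b, 0)

def loopA : Nat → List Int → List Int → List Int → Option (List Int)
  | _, _, _, [] => none
  | b, actions, np, i :: rest =>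
    match solveA b (actions ++ [i]) (np.filter (fun x => x != i)) with
    | some r => some r
    | none => loopA b actions np rest
termination_by b actions np is => (b, is.length + 1)
end

def solve (actions : List Int) (pos : List Int) : Option (List Int) :=
  solveA (7 - actions.length) actions pos

-- ===== PORT B =====
-- frame weight / stack measure used only to justify termination of the while loop
def pvW (base : Nat) (path : List Int) : Nat := 6 ^ (7 - (base + path.length))
def pvMu (base : Nat) (stack : List (List Int × List Int)) : Nat :=
  (stack.map (fun fr => pvW base fr.2)).sum

-- the while loop of B: pop a frame, succeed on empty position set, skip at the
-- depth bound, else push the five children in reverse order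
def runB (base : Nat) (stack : List (List Int × List Int)) : Option (List Int) :=
  match stack with
  | [] => none
  | (cur, path) :: rest =>
    if cur.length = 0 then some path
    else if 7 ≤ base + path.length then runB base rest
    else
      let np := pvNewPos cur
      runB base ((PySem.List.pyRange 4 (-1) (-1)).foldl
        (fun st i => (np.filter (fun x => x != i), path ++ [i]) :: st) rest)
termination_by pvMu base stack
decreasing_by
  · simp only [pvMu, List.map_cons, List.sum_cons, pvW]
    have : 0 < 6 ^ (7 - (base + path.length)) := pow_pos (by norm_num) _
    omega
  · rename_i hne hlt
    have hd : base + path.length < 7 := by omega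
    have hr : PySem.List.pyRange 4 (-1) (-1) = [4, 3, 2, 1, 0] := by decide
    simp only [hr, List.foldl, pvMu, List.map_cons, List.sum_cons, pvW,
      List.length_append, List.length_cons, List.length_nil, Nat.zero_add, Nat.add_zero]
    have h1 : 7 - (base + path.length) = (7 - (base + (path.length + 1))) + 1 := by omega
    rw [h1, pow_succ]
    have : 0 < 6 ^ (7 - (base + (path.length + 1))) := pow_pos (by norm_num) _
    omega

def solve_alt (actions : List Int) (pos : List Int) : Option (List Int) :=
  match runB actions.length [(pos, [])] with
  | some path => some (actions ++ path)
  | none => none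

-- ===== PRECONDITION & SPEC =====
def Spec_solve (actions : List Int) (pos : List Int) (out : Option (List Int)) : Prop := out = solve_alt actions pos
instance (actions : List Int) (pos : List Int) (out : Option (List Int)) : Decidable (Spec_solve actions pos out) := by unfold Spec_solve; infer_instance

-- ===== CLAIM (what is proved, stated in full; the proofs are below) =====
def Claim_equal_solve : Prop := ∀ (actions : List Int) (pos : List Int), Dom_solve actions pos → Spec_solve actions pos (solve actions pos)

-- ===== LEMMAS AND PROOFS =====

-- abstract form of the search: budget b = S - len(actions), returns the suffix path
mutual
def pvSA : Nat → List Int → Option (List Int)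
  | b, cur =>
    if cur.length = 0 then some []
    else match b with
      | 0 => none
      | b' + 1 => pvLoopS b' (pvNewPos cur) (PySem.List.pyRange 0 5 1)
termination_by b cur => (b, 0)

def pvLoopS : Nat → List Int → List Int → Option (List Int)
  | _, _, [] => none
  | b, np, i :: rest =>
    match pvSA b (np.filter (fun x => x != i)) with
    | some q => some (i :: q)
    | none => pvLoopS b np rest
termination_by b np is => (b, is.length + 1)
end

def pvPA (b : Nat) : Prop :=
  ∀ (actions pos : List Int), b = 7 - actions.length →
    solveA b actions pos = (pvSA b pos).map (fun q => actions ++ q)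

def pvQA (b : Nat) : Prop :=
  ∀ (actions np is : List Int), b = 7 - (actions.length + 1) →
    loopA b actions np is = (pvLoopS b np is).map (fun q => actions ++ q)

lemma pvQ_of_P (b : Nat) (hP : pvPA b) : pvQA b := by
  intro actions np is hb
  induction is with
  | nil => rw [loopA, pvLoopS]; rfl
  | cons i rest ih =>
    rw [loopA, pvLoopS]
    have hlen : (actions ++ [i]).length = actions.length + 1 := by simp
    have := hP (actions ++ [i]) (np.filter (fun x => x != i)) (by rw [hlen]; exact hb)
    rw [this]
    cases pvSA b (np.filter (fun x => x != i)) with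
    | none => simpa using ih
    | some q => simp

lemma pvP_zero : pvPA 0 := by
  intro actions pos hb
  rw [solveA, pvSA]
  by_cases hp : pos.length = 0
  · simp [hp]
  · have : 7 ≤ actions.length := by omega
    simp [hp, this]

lemma pvP_succ (b : Nat) (hQ : pvQA b) : pvPA (b + 1) := by
  intro actions pos hb
  rw [solveA, pvSA]
  by_cases hp : pos.length = 0
  · simp [hp]
  · have hlt : ¬ 7 ≤ actions.length := by omega
    simp only [hp, if_neg hp, if_neg hlt]
    exact hQ actions (pvNewPos pos) (PySem.List.pyRange 0 5 1) (by omega)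

lemma pvP_all : ∀ b, pvPA b := by
  intro b
  induction b with
  | zero => exact pvP_zero
  | succ b ih => exact pvP_succ b (pvQ_of_P b ih)

-- the B-side stack machine computes pvSA frame by frame
def pvE2 (n : Nat) : Prop :=
  ∀ (base : Nat) (cur path : List Int) (rest : List (List Int × List Int)),
    pvMu base ((cur, path) :: rest) ≤ n →
    runB base ((cur, path) :: rest) =
      match pvSA (7 - (base + path.length)) cur with
      | some q => some (path ++ q)
      | none => runB base rest

def pvChildren (np path : List Int) (is : List Int) : List (List Int × List Int) :=
  is.map (fun i => (np.filter (fun x => x != i), path ++ [i]))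

lemma pvMu_pos (base : Nat) (cur path : List Int) (rest : List (List Int × List Int)) :
    0 < pvMu base ((cur, path) :: rest) := by
  simp only [pvMu, List.map_cons, List.sum_cons, pvW]
  have : 0 < 6 ^ (7 - (base + path.length)) := pow_pos (by norm_num) _
  omega

lemma pvE2_aux (n : Nat) (IH : pvE2 n) (base : Nat) (np path : List Int) :
    ∀ (is : List Int) (rest' : List (List Int × List Int)),
      pvMu base (pvChildren np path is ++ rest') ≤ n →
      runB base (pvChildren np path is ++ rest') =
        match pvLoopS (7 - (base + path.length + 1)) np is with
        | some q => some (path ++ q)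
        | none => runB base rest' := by
  intro is
  induction is with
  | nil => intro rest' _; rw [pvLoopS]; simp [pvChildren]
  | cons i tl ih =>
    intro rest' hmu
    have hch : pvChildren np path (i :: tl) ++ rest'
        = (np.filter (fun x => x != i), path ++ [i]) :: (pvChildren np path tl ++ rest') := by
      simp [pvChildren]
    rw [hch] at hmu ⊢
    have hlen : (path ++ [i]).length = path.length + 1 := by simp
    have hIH := IH base (np.filter (fun x => x != i)) (path ++ [i]) (pvChildren np path tl ++ rest') hmu
    rw [hlen] at hIH
    rw [hIH, pvLoopS]
    cases pvSA (7 - (base + path.length + 1)) (np.filter (fun x => x != i)) with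
    | some q => simp
    | none =>
      simp only []
      have hmu' : pvMu base (pvChildren np path tl ++ rest') ≤ n := by
        have : 0 < pvW base (path ++ [i]) := pow_pos (by norm_num) _
        simp only [pvMu, List.map_cons, List.sum_cons] at hmu ⊢
        omega
      exact ih rest' hmu'

lemma pvE2_all : ∀ n, pvE2 n := by
  intro n
  induction n with
  | zero =>
    intro base cur path rest hmu
    exact absurd hmu (by have := pvMu_pos base cur path rest; omega)
  | succ n IH =>
    intro base cur path rest hmu
    by_cases hc : cur.length = 0
    · have hsome : pvSA (7 - (base + path.length)) cur = some [] := by rw [pvSA.eq_def]; simp [hc]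
      rw [runB, hsome]
      simp [hc]
    · by_cases hdep : 7 ≤ base + path.length
      · have h0 : 7 - (base + path.length) = 0 := by omega
        have hnone : pvSA 0 cur = none := by rw [pvSA]; simp [hc]
        rw [runB, h0, hnone]
        simp [hc, hdep]
      · -- push the five children
        have hd : base + path.length < 7 := by omega
        have hr : PySem.List.pyRange 4 (-1) (-1) = [4, 3, 2, 1, 0] := by decide
        have hb : 7 - (base + path.length) = (7 - (base + path.length + 1)) + 1 := by omega
        have hfold : (PySem.List.pyRange 4 (-1) (-1)).foldl
            (fun st i => ((pvNewPos cur).filter (fun x => x != i), path ++ [i]) :: st) rest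
            = pvChildren (pvNewPos cur) path [0, 1, 2, 3, 4] ++ rest := by
          rw [hr]; simp [pvChildren, List.foldl]
        rw [runB]
        simp only [if_neg hc, if_neg hdep]
        rw [hfold]
        have hmu' : pvMu base (pvChildren (pvNewPos cur) path [0, 1, 2, 3, 4] ++ rest) ≤ n := by
          have hpos : 0 < 6 ^ (7 - (base + path.length + 1)) := pow_pos (by norm_num) _
          simp only [pvMu, pvChildren, List.map_cons, List.sum_cons, List.map_append,
            List.sum_append, List.map_nil, List.sum_nil, pvW,
            List.length_append, List.length_cons, List.length_nil, Nat.zero_add,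
            ← Nat.add_assoc] at hmu ⊢
          rw [hb, pow_succ] at hmu
          omega
        rw [pvE2_aux n IH base (pvNewPos cur) path [0, 1, 2, 3, 4] rest hmu']
        have hpS : pvSA (7 - (base + path.length)) cur
            = pvLoopS (7 - (base + path.length + 1)) (pvNewPos cur) (PySem.List.pyRange 0 5 1) := by
          rw [hb, pvSA]
          simp [hc]
        rw [hpS]
        have hr5 : PySem.List.pyRange 0 5 1 = [0, 1, 2, 3, 4] := by decide
        rw [hr5]

-- ===== VERDICT (by name: the statement is the Claim_ definition above) =====
theorem solve_spec : Claim_equal_solve := by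
  intro actions pos _
  show solve actions pos = solve_alt actions pos
  rw [solve, solve_alt]
  rw [pvP_all (7 - actions.length) actions pos rfl]
  have hB := pvE2_all (pvMu actions.length [(pos, [])]) actions.length pos [] [] le_rfl
  simp only [List.length_nil, Nat.add_zero, List.nil_append] at hB
  rw [hB]
  cases pvSA (7 - actions.length) pos with
  | none => rw [runB]; rfl
  | some q => simp
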